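-- pv_equiv track=rewrite | github.com/Pymaster3119/Flashcards | main.py | generateStudyDifferences
-- ===== SOURCE A (Python) =====
-- def generateStudyDifferences(n):
--     sequence = [1, 2, 4, 9, 14]
--     differences = [1, 2, 5, 5]
--
--     while len(sequence) < n:
--         next_diff = differences[-1] + (differences[-1] - differences[-2]) if len(differences) > 1 else differences[-1] + 1
--         next_term = sequence[-1] + next_diff
--         sequence.append(next_term)
--         differences.append(next_diff)
--
--     return sequence
-- ===== SOURCE B (Python) =====
-- def generateStudyDifferences(n):
--     # Closed form: after the base [1,2,4,9,14] the differences are [1,2,5,5] and every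
--     # new difference is 5+(5-5)=5, so the tail is an arithmetic progression with step 5.
--     base = [1, 2, 4, 9, 14]
--     return base + [14 + 5 * (k - 4) for k in range(5, n)]
-- ===== Notes on version B (the rewrite author's own statement) =====
-- stated objective: simpler
-- what changed: Replaced the while-loop that maintains a growing differences array with a closed-form arithmetic-progression tail (every difference past the base is 5), built by a single list comprehension over range(5, n).
import Mathlib
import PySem

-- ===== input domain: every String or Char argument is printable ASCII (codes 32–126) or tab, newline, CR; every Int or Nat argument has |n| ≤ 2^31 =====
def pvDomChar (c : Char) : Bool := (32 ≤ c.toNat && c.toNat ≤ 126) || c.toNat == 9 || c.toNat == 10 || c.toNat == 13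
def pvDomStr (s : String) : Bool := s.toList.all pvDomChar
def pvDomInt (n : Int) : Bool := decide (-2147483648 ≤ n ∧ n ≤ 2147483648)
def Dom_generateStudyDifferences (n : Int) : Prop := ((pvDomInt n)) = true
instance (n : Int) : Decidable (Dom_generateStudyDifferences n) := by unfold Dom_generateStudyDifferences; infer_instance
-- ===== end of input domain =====

-- B replaces A's while-loop over a growing differences array by a closed-form step-5 arithmetic tail (simpler).


-- ===== PORT A =====
-- A's while-loop; differences[-1]/[-2] and sequence[-1] are ported with pyGet?;
-- the .getD 0 default is never reached (both lists always keep ≥ 2 elements).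
def pvLoopA (n : Int) (seq diffs : List Int) : List Int :=
  if (seq.length : Int) < n then
    let nextDiff :=
      if diffs.length > 1 then
        ((PySem.List.pyGet? diffs (-1)).getD 0) +
          (((PySem.List.pyGet? diffs (-1)).getD 0) - ((PySem.List.pyGet? diffs (-2)).getD 0))
      else ((PySem.List.pyGet? diffs (-1)).getD 0) + 1
    let nextTerm := ((PySem.List.pyGet? seq (-1)).getD 0) + nextDiff
    pvLoopA n (seq ++ [nextTerm]) (diffs ++ [nextDiff])
  else seq
termination_by (n - seq.length).toNat
decreasing_by simp; omega

def generateStudyDifferences (n : Int) : List Int :=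
  pvLoopA n [1, 2, 4, 9, 14] [1, 2, 5, 5]

-- ===== PORT B =====
def generateStudyDifferences_alt (n : Int) : List Int :=
  [1, 2, 4, 9, 14] ++ (PySem.List.pyRange 5 n 1).map (fun k => 14 + 5 * (k - 4))

-- ===== PRECONDITION & SPEC =====
def Spec_generateStudyDifferences (n : Int) (out : List Int) : Prop := out = generateStudyDifferences_alt n
instance (n : Int) (out : List Int) : Decidable (Spec_generateStudyDifferences n out) := by unfold Spec_generateStudyDifferences; infer_instance

-- ===== CLAIM (what is proved, stated in full; the proofs are below) =====
def Claim_equal_generateStudyDifferences : Prop := ∀ (n : Int), Dom_generateStudyDifferences n → Spec_generateStudyDifferences n (generateStudyDifferences n)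

-- ===== LEMMAS AND PROOFS =====

-- appending the value the list already ends in keeps the second-to-last element equal to it
theorem pyGet2_append (diffs : List Int) (h1 : (PySem.List.pyGet? diffs (-1)).getD 0 = 5)
    (hl : 0 < diffs.length) :
    (PySem.List.pyGet? (diffs ++ [(5:Int)]) (-2)).getD 0 = 5 := by
  simp only [PySem.List.pyGet?_neg_one] at h1
  simp only [PySem.List.pyGet?, PySem.List.pyIdx?, List.length_append, List.length_cons,
    List.length_nil]
  rw [if_neg (by norm_num), if_pos (by push_cast; omega)]
  have h2 : diffs.length + (0 + 1) - (-(-2:Int)).toNat = diffs.length - 1 := by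
    have : (-(-2:Int)).toNat = 2 := by decide
    omega
  rw [h2]
  show ((diffs ++ [(5:Int)])[diffs.length - 1]?).getD 0 = 5
  rw [List.getElem?_append_left (by omega), ← List.getLast?_eq_getElem?]
  exact h1

-- peel the first element off an arithmetic map over List.range
theorem range_succ_map_arith (a : Int) (t : Nat) :
    (List.range (t+1)).map (fun i : Nat => a + 5*((i:Int)+1))
      = (a+5) :: (List.range t).map (fun i : Nat => (a+5) + 5*((i:Int)+1)) := by
  rw [List.range_succ_eq_map]
  simp only [List.map_cons, List.map_map, List.cons.injEq]
  refine ⟨by norm_num, List.map_congr_left fun i _ => by simp [Function.comp]; ring⟩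

-- range(a,b) with step 1 is a shifted List.range
theorem pyRange_one_eq_range_map (m : Nat) : ∀ (a b : Int), (b - a).toNat = m →
    PySem.List.pyRange a b 1 = (List.range m).map (fun i : Nat => a + (i:Int)) := by
  induction m with
  | zero =>
    intro a b h
    rw [PySem.List.pyRange_one_eq_nil (by omega)]
    simp
  | succ m ih =>
    intro a b h
    rw [PySem.List.pyRange_one_cons (by omega), ih (a+1) b (by omega),
      List.range_succ_eq_map]
    simp only [List.map_cons, List.map_map, List.cons.injEq]
    refine ⟨by norm_num, List.map_congr_left fun i _ => by simp [Function.comp]; ring⟩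

-- A's loop from any state whose last term is a and whose differences end in 5,5
-- appends the step-5 arithmetic progression of the remaining length.
theorem pvLoopA_eq (t : Nat) : ∀ (n : Int) (seq diffs : List Int) (a : Int),
    (PySem.List.pyGet? seq (-1)).getD 0 = a →
    (PySem.List.pyGet? diffs (-1)).getD 0 = 5 →
    (PySem.List.pyGet? diffs (-2)).getD 0 = 5 →
    1 < diffs.length →
    (n - seq.length).toNat = t →
    pvLoopA n seq diffs = seq ++ (List.range t).map (fun i : Nat => a + 5 * ((i:Int) + 1)) := by
  induction t with
  | zero =>
    intro n seq diffs a _ _ _ _ ht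
    rw [pvLoopA, if_neg (by omega)]
    simp
  | succ t ih =>
    intro n seq diffs a ha h1 h2 hl ht
    rw [pvLoopA, if_pos (by omega)]
    simp only [if_pos hl, ha, h1, h2]
    have e5 : (5 : Int) + (5 - 5) = 5 := by norm_num
    rw [e5]
    rw [ih n (seq ++ [a + 5]) (diffs ++ [5]) (a + 5)
      (by simp [pysem]) (by simp [pysem]) (pyGet2_append diffs h1 (by omega))
      (by simp; omega) (by simp; omega)]
    rw [List.append_assoc, range_succ_map_arith]
    rfl

-- ===== VERDICT (by name: the statement is the Claim_ definition above) =====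
theorem generateStudyDifferences_spec : Claim_equal_generateStudyDifferences := by
  intro n _
  unfold Spec_generateStudyDifferences generateStudyDifferences generateStudyDifferences_alt
  rw [pvLoopA_eq (n - 5).toNat n _ _ 14 (by decide) (by decide) (by decide) (by decide) (by simp),
    pyRange_one_eq_range_map (n - 5).toNat 5 n (by omega)]
  simp only [List.map_map]
  congr 1
  exact List.map_congr_left fun i _ => by simp [Function.comp]; ring
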